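-- pv_equiv track=rewrite | github.com/Santos-Arellano/Next-level-Competitive-programming-expert | A - Sereja and Dima/Sereja_and_Dima.py | sereja_and_dima
-- ===== SOURCE A (Python) =====
-- def sereja_and_dima(cards):
--     # Inicializamos los punteros para los extremos izquierdo y derecho
--     left, right = 0, len(cards) - 1
--
--     # Inicializamos las puntuaciones de ambos jugadores
--     sereja_score, dima_score = 0, 0
--
--     # Usamos una variable para alternar el turno: True para Sereja, False para Dima
--     turn = True
--
--     # Continuamos mientras haya cartas
--     while left <= right:
--         if cards[left] > cards[right]:
--             chosen_card = cards[left]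
--             left += 1
--         else:
--             chosen_card = cards[right]
--             right -= 1
--
--         if turn:
--             sereja_score += chosen_card  # Es turno de Sereja
--         else:
--             dima_score += chosen_card  # Es turno de Dima
--
--         turn = not turn  # Cambiamos el turno
--
--     return sereja_score, dima_score
-- ===== SOURCE B (Python) =====
-- def sereja_and_dima(cards):
--     # Pass 1: pure greedy selection — collect the taken cards in order, no scoring.
--     picked = []
--     left, right = 0, len(cards) - 1
--     while left <= right:
--         if cards[left] > cards[right]:
--             picked.append(cards[left])
--             left += 1
--         else:
--             picked.append(cards[right])
--             right -= 1
--     # Pass 2: score back-to-front; the swap assigns cards at even positions to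
--     # Sereja and odd positions to Dima with no turn flag and no branch.
--     sereja_score, dima_score = 0, 0
--     for card in reversed(picked):
--         sereja_score, dima_score = card + dima_score, sereja_score
--     return sereja_score, dima_score
-- ===== Notes on version B (the rewrite author's own statement) =====
-- stated objective: alternative
-- what changed: B splits A's single stateful loop into two passes: a pure greedy pass that only collects the picked cards, then a flagless back-to-front swap fold that assigns even positions to Sereja and odd to Dima, eliminating the alternating turn flag and its branch.
import Mathlib
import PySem

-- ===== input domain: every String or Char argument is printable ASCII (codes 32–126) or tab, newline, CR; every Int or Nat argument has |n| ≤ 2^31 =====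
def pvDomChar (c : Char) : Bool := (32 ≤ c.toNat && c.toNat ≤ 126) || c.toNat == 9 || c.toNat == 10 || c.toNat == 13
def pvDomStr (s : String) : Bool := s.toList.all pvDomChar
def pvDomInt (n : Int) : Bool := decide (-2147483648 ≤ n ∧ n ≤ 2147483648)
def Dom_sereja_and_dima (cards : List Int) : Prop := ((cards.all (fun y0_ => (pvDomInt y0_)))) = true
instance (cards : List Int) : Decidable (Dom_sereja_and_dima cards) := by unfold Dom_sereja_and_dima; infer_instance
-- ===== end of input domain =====

-- B replaces A's single loop (turn flag + in-loop scoring) by a pure greedy pick pass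
-- followed by a flagless back-to-front swap fold; same O(n) cost (objective: alternative).


-- ===== PORT A =====
-- A's while loop, recursed on a fuel of cards.length: the loop removes one card per
-- iteration, so the fuel never runs out; indices stay in range, so .getD 0 is never used.
def serejaDimaLoopA (cards : List Int) :
    Nat → Int → Int → Int → Int → Bool → Int × Int
  | 0, _, _, sereja_score, dima_score, _ => (sereja_score, dima_score)
  | fuel + 1, left, right, sereja_score, dima_score, turn =>
    if left ≤ right then
      let chosen_card :=
        if (PySem.List.pyGet? cards left).getD 0 > (PySem.List.pyGet? cards right).getD 0 then
          (PySem.List.pyGet? cards left).getD 0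
        else
          (PySem.List.pyGet? cards right).getD 0
      let left' := if (PySem.List.pyGet? cards left).getD 0 > (PySem.List.pyGet? cards right).getD 0 then left + 1 else left
      let right' := if (PySem.List.pyGet? cards left).getD 0 > (PySem.List.pyGet? cards right).getD 0 then right else right - 1
      if turn then
        serejaDimaLoopA cards fuel left' right' (sereja_score + chosen_card) dima_score (!turn)
      else
        serejaDimaLoopA cards fuel left' right' sereja_score (dima_score + chosen_card) (!turn)
    else
      (sereja_score, dima_score)

def sereja_and_dima (cards : List Int) : Int × Int :=
  serejaDimaLoopA cards cards.length 0 ((cards.length : Int) - 1) 0 0 true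

-- ===== PORT B =====
-- Pass 1 of Source B: the pure greedy pick loop building `picked` in order (same fuel argument).
def serejaDimaPick (cards : List Int) : Nat → Int → Int → List Int
  | 0, _, _ => []
  | fuel + 1, left, right =>
    if left ≤ right then
      if (PySem.List.pyGet? cards left).getD 0 > (PySem.List.pyGet? cards right).getD 0 then
        (PySem.List.pyGet? cards left).getD 0 :: serejaDimaPick cards fuel (left + 1) right
      else
        (PySem.List.pyGet? cards right).getD 0 :: serejaDimaPick cards fuel left (right - 1)
    else
      []

def sereja_and_dima_alt (cards : List Int) : Int × Int :=
  let picked := serejaDimaPick cards cards.length 0 ((cards.length : Int) - 1)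
  -- Pass 2 of Source B: 'for card in reversed(picked): s, d = card + d, s'
  picked.reverse.foldl (fun (sd : Int × Int) card => (card + sd.2, sd.1)) (0, 0)

-- ===== PRECONDITION & SPEC =====
def Spec_sereja_and_dima (cards : List Int) (out : Int × Int) : Prop := out = sereja_and_dima_alt cards
instance (cards : List Int) (out : Int × Int) : Decidable (Spec_sereja_and_dima cards out) := by unfold Spec_sereja_and_dima; infer_instance

-- ===== CLAIM (what is proved, stated in full; the proofs are below) =====
def Claim_equal_sereja_and_dima : Prop := ∀ (cards : List Int), Dom_sereja_and_dima cards → Spec_sereja_and_dima cards (sereja_and_dima cards)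

-- ===== LEMMAS AND PROOFS =====

-- B's reversed-fold equals the structural swap foldr over `picked`.
theorem swapFold_reverse (xs : List Int) :
    xs.reverse.foldl (fun (sd : Int × Int) card => (card + sd.2, sd.1)) (0, 0) =
      xs.foldr (fun card (sd : Int × Int) => (card + sd.2, sd.1)) (0, 0) := by
  rw [List.foldl_reverse]

-- Invariant: A's loop from any state is its entry scores plus the swap foldr of the
-- cards that pass 1 of B picks from the same pointer pair, routed by `turn`.
theorem loopA_eq_pick (cards : List Int) : ∀ (fuel : Nat) (left right s d : Int) (turn : Bool),
    serejaDimaLoopA cards fuel left right s d turn =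
      (let p := (serejaDimaPick cards fuel left right).foldr
          (fun card (sd : Int × Int) => (card + sd.2, sd.1)) (0, 0)
       if turn then (s + p.1, d + p.2) else (s + p.2, d + p.1)) := by
  intro fuel
  induction fuel with
  | zero => intro _ _ s d turn; cases turn <;> simp [serejaDimaLoopA, serejaDimaPick]
  | succ fuel ih =>
    intro left right s d turn
    rw [serejaDimaLoopA, serejaDimaPick]
    by_cases h : left ≤ right
    · simp only [if_pos h]
      by_cases hc : (PySem.List.pyGet? cards left).getD 0 > (PySem.List.pyGet? cards right).getD 0
      · simp only [if_pos hc, List.foldr_cons]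
        cases turn <;>
          simp only [ih, Bool.not_true, Bool.not_false, if_true] <;>
          · cases hp : (serejaDimaPick cards fuel (left + 1) right).foldr
              (fun card (sd : Int × Int) => (card + sd.2, sd.1)) (0, 0)
            simp [add_assoc]
      · simp only [if_neg hc, List.foldr_cons]
        cases turn <;>
          simp only [ih, Bool.not_true, Bool.not_false, if_true] <;>
          · cases hp : (serejaDimaPick cards fuel left (right - 1)).foldr
              (fun card (sd : Int × Int) => (card + sd.2, sd.1)) (0, 0)
            simp [add_assoc]
    · cases turn <;> simp [if_neg h]

-- ===== VERDICT (by name: the statement is the Claim_ definition above) =====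
theorem sereja_and_dima_spec : Claim_equal_sereja_and_dima := by
  intro cards _
  unfold Spec_sereja_and_dima sereja_and_dima sereja_and_dima_alt
  rw [swapFold_reverse, loopA_eq_pick]
  simp
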